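-- pv_equiv track=rewrite | github.com/Foolllll-J/astrbot_plugin_reminder | core/utils.py | summarize_message_structure
-- ===== SOURCE A (Python) =====
-- from typing import Any, Dict, List, Optional
--
-- def summarize_message_structure(message_structure: List[Dict[str, Any]]) -> Dict[str, int]:
--     """统计各类消息组件数量。"""
--     summary = {
--         "text": 0,
--         "image": 0,
--         "face": 0,
--         "at": 0,
--         "atall": 0,
--         "record": 0,
--         "video": 0,
--     }
--     for item in message_structure or []:
--         item_type = item.get("type")
--         if item_type in summary:
--             summary[item_type] += 1
--     return summary
-- ===== SOURCE B (Python) =====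
-- def summarize_message_structure(message_structure):
--     """Sort-then-scan: sort the present type tags, measure each run of equal
--     tags in one linear scan, then project the seven fixed keys."""
--     types = sorted(t for item in (message_structure or [])
--                    if (t := item.get("type")) is not None)
--     runs = {}
--     i, n = 0, len(types)
--     while i < n:
--         j = i
--         while j < n and types[j] == types[i]:
--             j += 1
--         runs[types[i]] = j - i
--         i = j
--     return {k: runs.get(k, 0)
--             for k in ("text", "image", "face", "at", "atall", "record", "video")}
-- ===== Notes on version B (the rewrite author's own statement) =====
-- stated objective: alternative
-- what changed: B replaces A's single-pass whitelist-membership increment loop with sort-then-scan: it extracts the present type tags, sorts them, measures each run of equal tags in one linear scan to build a run-length table, and finally projects the seven fixed keys from that table.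
import Mathlib
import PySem

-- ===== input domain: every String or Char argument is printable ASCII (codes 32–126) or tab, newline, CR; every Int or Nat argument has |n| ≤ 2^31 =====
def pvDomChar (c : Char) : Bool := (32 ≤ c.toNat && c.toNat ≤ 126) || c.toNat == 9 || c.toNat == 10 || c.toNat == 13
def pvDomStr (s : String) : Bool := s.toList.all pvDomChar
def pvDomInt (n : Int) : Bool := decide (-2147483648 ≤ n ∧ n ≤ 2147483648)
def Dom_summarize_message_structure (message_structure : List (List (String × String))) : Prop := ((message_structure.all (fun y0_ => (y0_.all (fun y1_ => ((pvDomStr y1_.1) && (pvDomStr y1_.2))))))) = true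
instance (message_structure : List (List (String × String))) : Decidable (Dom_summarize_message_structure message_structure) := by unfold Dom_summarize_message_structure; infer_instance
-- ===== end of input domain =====

-- B replaces A's whitelist-membership increment loop by sort-then-scan: sort the present type tags, measure runs of equal tags, project the seven fixed keys (alternative algorithm).


-- ===== PORT A =====
-- item.get("type") on a Python dict item (assoc list, first match)
def smsGetType (item : List (String × String)) : Option String :=
  (PySem.Dict.mk item).get? "type"

-- A's loop body: if item_type in summary: summary[item_type] += 1
def smsStep (summary : PySem.Dict String Int) (item : List (String × String)) :
    PySem.Dict String Int :=
  match smsGetType item with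
  | some t => if summary.contains t then summary.modify t 0 (· + 1) else summary
  | none => summary

def summarize_message_structure (message_structure : List (List (String × String))) :
    List (String × Int) :=
  (message_structure.foldl smsStep
    (PySem.Dict.ofList [("text", 0), ("image", 0), ("face", 0), ("at", 0),
                        ("atall", 0), ("record", 0), ("video", 0)])).items

-- ===== PORT B =====
-- the outer while loop of Source B: it advances i to j, the end of the run of tags
-- equal to types[i], and records runs[types[i]] = j - i; ported as recursion on
-- the remaining suffix, the inner while loop (scan to the run's end) being
-- takeWhile/dropWhile on that suffix.
def smsRunsLoop : List String → PySem.Dict String Int → PySem.Dict String Int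
  | [], runs => runs
  | x :: rest, runs =>
      smsRunsLoop (rest.dropWhile (fun y => y == x))
        (runs.insert x (1 + (rest.takeWhile (fun y => y == x)).length))
termination_by l => l.length
decreasing_by
  simpa using Nat.lt_succ_of_le (List.length_dropWhile_le _ _)

def summarize_message_structure_alt (message_structure : List (List (String × String))) :
    List (String × Int) :=
  -- sorted(t for item in (message_structure or []) if (t := item.get("type")) is not None)
  let types := PySem.List.sorted (message_structure.filterMap smsGetType) (fun x => x) false
  let runs := smsRunsLoop types PySem.Dict.empty
  -- {k: runs.get(k, 0) for k in (...)}: seven distinct literal keys, in order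
  ["text", "image", "face", "at", "atall", "record", "video"].map
    (fun k => (k, runs.getD k 0))

-- ===== PRECONDITION & SPEC =====
def Spec_summarize_message_structure (message_structure : List (List (String × String))) (out : List (String × Int)) : Prop := out = summarize_message_structure_alt message_structure
instance (message_structure : List (List (String × String))) (out : List (String × Int)) : Decidable (Spec_summarize_message_structure message_structure out) := by unfold Spec_summarize_message_structure; infer_instance

-- ===== CLAIM (what is proved, stated in full; the proofs are below) =====
def Claim_equal_summarize_message_structure : Prop := ∀ (message_structure : List (List (String × String))), Dom_summarize_message_structure message_structure → Spec_summarize_message_structure message_structure (summarize_message_structure message_structure)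

-- ===== LEMMAS AND PROOFS =====

-- A's loop, characterised: each of the seven counters ends at its start value
-- plus the number of items whose type is that key.
lemma sms_loop (ms : List (List (String × String))) (a b c d e f g : Int) :
    (ms.foldl smsStep
      (PySem.Dict.mk [("text", a), ("image", b), ("face", c), ("at", d),
                      ("atall", e), ("record", f), ("video", g)])).items
    = [("text", a + ((ms.map smsGetType).count (some "text") : Int)),
       ("image", b + ((ms.map smsGetType).count (some "image") : Int)),
       ("face", c + ((ms.map smsGetType).count (some "face") : Int)),
       ("at", d + ((ms.map smsGetType).count (some "at") : Int)),
       ("atall", e + ((ms.map smsGetType).count (some "atall") : Int)),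
       ("record", f + ((ms.map smsGetType).count (some "record") : Int)),
       ("video", g + ((ms.map smsGetType).count (some "video") : Int))] := by
  induction ms generalizing a b c d e f g with
  | nil => simp
  | cons x ms ih =>
    simp only [List.foldl_cons, List.map_cons, List.count_cons]
    rcases hx : smsGetType x with _ | t
    · simp [smsStep, hx, ih]
    · by_cases h1 : t = "text"
      · subst h1; simp [smsStep, hx, PySem.Dict.contains, PySem.Dict.modify, PySem.Dict.insert, PySem.Dict.getD, PySem.Dict.get?, ih]; ring
      · by_cases h2 : t = "image"
        · subst h2; simp [smsStep, hx, PySem.Dict.contains, PySem.Dict.modify, PySem.Dict.insert, PySem.Dict.getD, PySem.Dict.get?, ih]; ring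
        · by_cases h3 : t = "face"
          · subst h3; simp [smsStep, hx, PySem.Dict.contains, PySem.Dict.modify, PySem.Dict.insert, PySem.Dict.getD, PySem.Dict.get?, ih]; ring
          · by_cases h4 : t = "at"
            · subst h4; simp [smsStep, hx, PySem.Dict.contains, PySem.Dict.modify, PySem.Dict.insert, PySem.Dict.getD, PySem.Dict.get?, ih]; ring
            · by_cases h5 : t = "atall"
              · subst h5; simp [smsStep, hx, PySem.Dict.contains, PySem.Dict.modify, PySem.Dict.insert, PySem.Dict.getD, PySem.Dict.get?, ih]; ring
              · by_cases h6 : t = "record"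
                · subst h6; simp [smsStep, hx, PySem.Dict.contains, PySem.Dict.modify, PySem.Dict.insert, PySem.Dict.getD, PySem.Dict.get?, ih]; ring
                · by_cases h7 : t = "video"
                  · subst h7; simp [smsStep, hx, PySem.Dict.contains, PySem.Dict.modify, PySem.Dict.insert, PySem.Dict.getD, PySem.Dict.get?, ih]; ring
                  · simp [smsStep, hx, PySem.Dict.contains, ih, h1, h2, h3, h4, h5, h6, h7, Ne.symm h1, Ne.symm h2, Ne.symm h3, Ne.symm h4, Ne.symm h5, Ne.symm h6, Ne.symm h7]

-- in a ≤-sorted list x :: xs, the run head x does not reappear after its run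
lemma not_mem_dropWhile_of_sorted (x : String) (xs : List String)
    (hs : (x :: xs).Pairwise (· ≤ ·)) : x ∉ xs.dropWhile (fun y => y == x) := by
  intro hmem
  have hxs : xs.Pairwise (· ≤ ·) := (List.pairwise_cons.mp hs).2
  have hle : ∀ y ∈ xs, x ≤ y := (List.pairwise_cons.mp hs).1
  have hrp : (xs.dropWhile (fun y => y == x)).Pairwise (· ≤ ·) :=
    hxs.sublist (List.dropWhile_sublist _)
  rcases hr : xs.dropWhile (fun y => y == x) with _ | ⟨h, t⟩
  · rw [hr] at hmem; exact absurd hmem (List.not_mem_nil)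
  · have hrne : xs.dropWhile (fun y => y == x) ≠ [] := by rw [hr]; simp
    have hhead : (fun y => y == x) ((xs.dropWhile (fun y => y == x)).head hrne) = false :=
      List.head_dropWhile_not _ hrne
    have hhx : h ≠ x := by
      have : (xs.dropWhile (fun y => y == x)).head hrne = h := by simp [hr]
      rw [this] at hhead; simpa using hhead
    have hhmem : h ∈ xs := (List.dropWhile_sublist _).mem (by rw [hr]; exact List.mem_cons_self)
    have hxlt : x < h := lt_of_le_of_ne (hle _ hhmem) (Ne.symm hhx)
    rw [hr] at hmem hrp
    rcases List.mem_cons.mp hmem with h' | h'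
    · exact hhx h'.symm
    · have : h ≤ x := (List.pairwise_cons.mp hrp).1 _ h'
      exact absurd (lt_of_lt_of_le hxlt this) (lt_irrefl x)

-- the run loop over a ≤-sorted list: lookup of k is the count of k in the list
-- (or the start dict's value when k is absent); strong induction on length
lemma smsRunsLoop_getD_aux (n : Nat) : ∀ (s : List String), s.length ≤ n →
    ∀ (d : PySem.Dict String Int) (k : String), s.Pairwise (· ≤ ·) →
    (smsRunsLoop s d).getD k 0 =
      if k ∈ s then (s.count k : Int) else d.getD k 0 := by
  induction n with
  | zero =>
    intro s hn d k _
    rw [List.length_eq_zero_iff.mp (Nat.le_zero.mp hn)]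
    simp [smsRunsLoop]
  | succ n ih =>
    intro s hn d k hs
    match s with
    | [] => simp [smsRunsLoop]
    | x :: rest =>
      have hxs : rest.Pairwise (· ≤ ·) := (List.pairwise_cons.mp hs).2
      have hrp : (rest.dropWhile (fun y => y == x)).Pairwise (· ≤ ·) :=
        hxs.sublist (List.dropWhile_sublist _)
      have hlen : (rest.dropWhile (fun y => y == x)).length ≤ n :=
        le_trans (List.length_dropWhile_le _ _) (by simpa using hn)
      have hnx : x ∉ rest.dropWhile (fun y => y == x) :=
        not_mem_dropWhile_of_sorted x rest hs
      have hsplit : rest.takeWhile (fun y => y == x) ++ rest.dropWhile (fun y => y == x) = rest :=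
        List.takeWhile_append_dropWhile
      have htall : ∀ y ∈ rest.takeWhile (fun y => y == x), y = x := by
        intro y hy
        simpa using List.mem_takeWhile_imp hy
      rw [smsRunsLoop, ih _ hlen _ _ hrp]
      have hkc : ∀ j : String, rest.count j =
          (rest.takeWhile (fun y => y == x)).count j
            + (rest.dropWhile (fun y => y == x)).count j := by
        intro j
        conv_lhs => rw [← hsplit]
        rw [List.count_append]
      by_cases hk : k = x
      · subst hk
        rw [if_neg hnx, PySem.Dict.getD_insert_self, if_pos (List.mem_cons_self)]
        have hct : (rest.takeWhile (fun y => y == k)).count k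
            = (rest.takeWhile (fun y => y == k)).length :=
          List.count_eq_length.mpr (fun y hy => (htall y hy).symm)
        have hcd : (rest.dropWhile (fun y => y == k)).count k = 0 :=
          List.count_eq_zero.mpr hnx
        have hcr : rest.count k = (rest.takeWhile (fun y => y == k)).length := by
          rw [hkc, hct, hcd]
          omega
        rw [List.count_cons_self, hcr]
        push_cast
        ring
      · have hkt : k ∉ rest.takeWhile (fun y => y == x) := fun h => hk (htall k h)
        have hmem : k ∈ rest ↔ k ∈ rest.dropWhile (fun y => y == x) := by
          constructor
          · intro h
            have h' : k ∈ rest.takeWhile (fun y => y == x) ++ rest.dropWhile (fun y => y == x) := by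
              rw [hsplit]; exact h
            rcases List.mem_append.mp h' with h'' | h''
            · exact absurd h'' hkt
            · exact h''
          · intro h
            rw [← hsplit]; exact List.mem_append.mpr (Or.inr h)
        by_cases hkr : k ∈ rest.dropWhile (fun y => y == x)
        · rw [if_pos hkr, if_pos (List.mem_cons.mpr (Or.inr (hmem.mpr hkr)))]
          have hct : (rest.takeWhile (fun y => y == x)).count k = 0 :=
            List.count_eq_zero.mpr hkt
          have hcr : rest.count k = (rest.dropWhile (fun y => y == x)).count k := by
            rw [hkc, hct]; ring
          rw [List.count_cons_of_ne (fun h => hk h.symm), hcr]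
        · rw [if_neg hkr, if_neg (by
            intro h
            rcases List.mem_cons.mp h with h' | h'
            · exact hk h'
            · exact hkr (hmem.mp h'))]
          rw [PySem.Dict.getD_insert]
          simp [hk]

lemma smsRunsLoop_getD (s : List String) (d : PySem.Dict String Int) (k : String)
    (hs : s.Pairwise (· ≤ ·)) :
    (smsRunsLoop s d).getD k 0 =
      if k ∈ s then (s.count k : Int) else d.getD k 0 :=
  smsRunsLoop_getD_aux s.length s le_rfl d k hs

-- count of some k among the raw get-results = count of k among the present tags
lemma count_filterMap_eq (ms : List (List (String × String))) (k : String) :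
    (ms.filterMap smsGetType).count k = (ms.map smsGetType).count (some k) := by
  induction ms with
  | nil => rfl
  | cons x ms ih =>
    rcases hx : smsGetType x with _ | t
    · simp [hx, ih]
    · by_cases h : t = k
      · subst h; simp [hx, ih]
      · simp [hx, ih, h]

-- B's lookup of any key k is the number of items whose type is k
lemma alt_getD (ms : List (List (String × String))) (k : String) :
    (smsRunsLoop (PySem.List.sorted (ms.filterMap smsGetType) (fun x => x) false)
        PySem.Dict.empty).getD k 0
      = ((ms.map smsGetType).count (some k) : Int) := by
  set s := PySem.List.sorted (ms.filterMap smsGetType) (fun x => x) false with hsdef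
  have hperm : s.Perm (ms.filterMap smsGetType) := PySem.List.sorted_perm _ _ _
  have hpw : s.Pairwise (· ≤ ·) := by
    simpa using PySem.List.sorted_pairwise (ms.filterMap smsGetType) (fun x => x)
  rw [smsRunsLoop_getD s PySem.Dict.empty k hpw]
  by_cases hk : k ∈ s
  · rw [if_pos hk, hperm.count_eq, count_filterMap_eq]
  · rw [if_neg hk]
    have : (ms.filterMap smsGetType).count k = 0 :=
      List.count_eq_zero.mpr (fun h => hk (hperm.mem_iff.mpr h))
    rw [← count_filterMap_eq, this]
    simp [PySem.Dict.getD_empty]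

-- ===== VERDICT (by name: the statement is the Claim_ definition above) =====
theorem summarize_message_structure_spec : Claim_equal_summarize_message_structure := by
  intro ms _
  unfold Spec_summarize_message_structure summarize_message_structure summarize_message_structure_alt
  rw [show PySem.Dict.ofList [(("text":String), (0:Int)), ("image", 0), ("face", 0), ("at", 0), ("atall", 0), ("record", 0), ("video", 0)] = PySem.Dict.mk [("text", 0), ("image", 0), ("face", 0), ("at", 0), ("atall", 0), ("record", 0), ("video", 0)] from by decide]
  rw [sms_loop]
  simp only [List.map_cons, List.map_nil, alt_getD]
  norm_num
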